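-- pv_equiv track=rewrite | github.com/Twine2546/shapez2-solver | shapez2_solver/operations/cutter.py | _are_crystals_connected
-- ===== SOURCE A (Python) =====
-- def _are_crystals_connected(
--     group1: list, group2: list
-- ) -> bool:
--     """Check if any crystals in group1 are adjacent to crystals in group2."""
--     adjacency = {0: [1, 3], 1: [0, 2], 2: [1, 3], 3: [0, 2]}
--     for i in group1:
--         for adj in adjacency.get(i, []):
--             if adj in group2:
--                 return True
--     return False
-- ===== SOURCE B (Python) =====
-- def _are_crystals_connected(
--     group1: list, group2: list
-- ) -> bool:
--     """Check if any crystals in group1 are adjacent to crystals in group2."""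
--     g1_even = any(i in (0, 2) for i in group1)
--     g1_odd = any(i in (1, 3) for i in group1)
--     g2_even = any(j in (0, 2) for j in group2)
--     g2_odd = any(j in (1, 3) for j in group2)
--     return (g1_even and g2_odd) or (g1_odd and g2_even)
-- ===== Notes on version B (the rewrite author's own statement) =====
-- stated objective: simpler
-- what changed: Replaced the adjacency dict and the nested membership loop by four flat presence checks (even/odd quadrant present in each group) combined with one boolean formula, since adjacency among quadrants 0-3 is exactly opposite parity.
import Mathlib
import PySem

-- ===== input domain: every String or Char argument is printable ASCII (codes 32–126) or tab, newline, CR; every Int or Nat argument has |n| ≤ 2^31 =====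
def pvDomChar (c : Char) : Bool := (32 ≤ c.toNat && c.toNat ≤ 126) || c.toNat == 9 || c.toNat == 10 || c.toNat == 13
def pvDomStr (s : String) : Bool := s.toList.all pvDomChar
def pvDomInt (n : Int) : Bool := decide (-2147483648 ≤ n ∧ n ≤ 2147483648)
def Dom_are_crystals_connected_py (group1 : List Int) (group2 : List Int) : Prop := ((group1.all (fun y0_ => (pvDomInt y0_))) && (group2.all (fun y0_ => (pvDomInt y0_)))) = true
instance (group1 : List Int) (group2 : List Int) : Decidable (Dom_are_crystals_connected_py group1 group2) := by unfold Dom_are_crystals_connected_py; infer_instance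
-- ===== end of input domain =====

-- B replaces A's adjacency dict and nested membership loop by four flat
-- presence checks (even/odd quadrant in each group) plus one boolean formula (simpler).

-- ===== PORT A =====
-- adjacency.get(i, []) for the literal dict {0:[1,3], 1:[0,2], 2:[1,3], 3:[0,2]}
def pvAdjacencyGet (i : Int) : List Int :=
  if i = 0 then [1, 3]
  else if i = 1 then [0, 2]
  else if i = 2 then [1, 3]
  else if i = 3 then [0, 2]
  else []

-- inner loop: for adj in adjs: if adj in group2: return True
def pvInnerLoop (adjs : List Int) (group2 : List Int) : Bool :=
  match adjs with
  | [] => false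
  | adj :: rest => if group2.contains adj then true else pvInnerLoop rest group2

-- outer loop over group1
def pvOuterLoop (group1 : List Int) (group2 : List Int) : Bool :=
  match group1 with
  | [] => false
  | i :: rest =>
      if pvInnerLoop (pvAdjacencyGet i) group2 then true else pvOuterLoop rest group2

def are_crystals_connected_py (group1 : List Int) (group2 : List Int) : Bool :=
  pvOuterLoop group1 group2

-- ===== PORT B =====
def are_crystals_connected_py_alt (group1 : List Int) (group2 : List Int) : Bool :=
  let g1_even := group1.any (fun i => i == 0 || i == 2)
  let g1_odd := group1.any (fun i => i == 1 || i == 3)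
  let g2_even := group2.any (fun j => j == 0 || j == 2)
  let g2_odd := group2.any (fun j => j == 1 || j == 3)
  (g1_even && g2_odd) || (g1_odd && g2_even)

-- ===== PRECONDITION & SPEC =====
def Spec_are_crystals_connected_py (group1 : List Int) (group2 : List Int) (out : Bool) : Prop := out = are_crystals_connected_py_alt group1 group2
instance (group1 : List Int) (group2 : List Int) (out : Bool) : Decidable (Spec_are_crystals_connected_py group1 group2 out) := by unfold Spec_are_crystals_connected_py; infer_instance

-- ===== CLAIM (what is proved, stated in full; the proofs are below) =====
def Claim_equal_are_crystals_connected_py : Prop := ∀ (group1 : List Int) (group2 : List Int), Dom_are_crystals_connected_py group1 group2 → Spec_are_crystals_connected_py group1 group2 (are_crystals_connected_py group1 group2)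

-- ===== LEMMAS AND PROOFS =====

-- ===== VERDICT (by name: the statement is the Claim_ definition above) =====
lemma pv_any_or (l : List Int) (p q : Int → Bool) :
    (l.any fun x => p x || q x) = (l.any p || l.any q) := by
  induction l with
  | nil => rfl
  | cons a rest ih =>
      simp [List.any_cons, ih]
      cases p a <;> cases q a <;> simp

lemma pvContains_eq (group2 : List Int) (a : Int) :
    group2.contains a = group2.any (fun j => j == a) := by
  induction group2 with
  | nil => rfl
  | cons b rest ih =>
      have hc : (b == a) = decide (a = b) := by
        by_cases h : a = b <;> simp [h] <;> omega
      simp [List.any_cons, ← ih, hc]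

lemma pvOuter_eq (group1 group2 : List Int) :
    pvOuterLoop group1 group2 =
      ((group1.any (fun i => i == 0 || i == 2) && group2.any (fun j => j == 1 || j == 3)) ||
       (group1.any (fun i => i == 1 || i == 3) && group2.any (fun j => j == 0 || j == 2))) := by
  induction group1 with
  | nil => simp [pvOuterLoop]
  | cons i rest ih =>
      rw [pvOuterLoop]
      have h13 : group2.any (fun j => j == 1 || j == 3) =
          (group2.contains 1 || group2.contains 3) := by
        rw [pv_any_or, pvContains_eq, pvContains_eq]
      have h02 : group2.any (fun j => j == 0 || j == 2) =
          (group2.contains 0 || group2.contains 2) := by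
        rw [pv_any_or, pvContains_eq, pvContains_eq]
      by_cases e0 : i = 0
      · subst e0; simp [pvAdjacencyGet, pvInnerLoop, List.any_cons, ih, h13, h02]
        cases decide ((1:ℤ) ∈ group2) <;> cases decide ((3:ℤ) ∈ group2) <;> cases decide ((0:ℤ) ∈ group2) <;> cases decide ((2:ℤ) ∈ group2) <;> cases (rest.any fun i => i == 0 || i == 2) <;> cases (rest.any fun j => j == 1 || j == 3) <;> rfl
      by_cases e1 : i = 1
      · subst e1; simp [pvAdjacencyGet, pvInnerLoop, List.any_cons, ih, h13, h02]
        cases decide ((1:ℤ) ∈ group2) <;> cases decide ((3:ℤ) ∈ group2) <;> cases decide ((0:ℤ) ∈ group2) <;> cases decide ((2:ℤ) ∈ group2) <;> cases (rest.any fun i => i == 0 || i == 2) <;> cases (rest.any fun j => j == 1 || j == 3) <;> rfl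
      by_cases e2 : i = 2
      · subst e2; simp [pvAdjacencyGet, pvInnerLoop, List.any_cons, ih, h13, h02]
        cases decide ((1:ℤ) ∈ group2) <;> cases decide ((3:ℤ) ∈ group2) <;> cases decide ((0:ℤ) ∈ group2) <;> cases decide ((2:ℤ) ∈ group2) <;> cases (rest.any fun i => i == 0 || i == 2) <;> cases (rest.any fun j => j == 1 || j == 3) <;> rfl
      by_cases e3 : i = 3
      · subst e3; simp [pvAdjacencyGet, pvInnerLoop, List.any_cons, ih, h13, h02]
        cases decide ((1:ℤ) ∈ group2) <;> cases decide ((3:ℤ) ∈ group2) <;> cases decide ((0:ℤ) ∈ group2) <;> cases decide ((2:ℤ) ∈ group2) <;> cases (rest.any fun i => i == 0 || i == 2) <;> cases (rest.any fun j => j == 1 || j == 3) <;> rfl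
      · have b0 : (i == (0:ℤ)) = false := by simp [e0]
        have b1 : (i == (1:ℤ)) = false := by simp [e1]
        have b2 : (i == (2:ℤ)) = false := by simp [e2]
        have b3 : (i == (3:ℤ)) = false := by simp [e3]
        simp [pvAdjacencyGet, pvInnerLoop, e0, e1, e2, e3, List.any_cons, ih, b0, b1, b2, b3]

theorem are_crystals_connected_py_spec : Claim_equal_are_crystals_connected_py := by
  intro g1 g2 _
  unfold Spec_are_crystals_connected_py are_crystals_connected_py are_crystals_connected_py_alt
  simp [pvOuter_eq]
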